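-- pv_equiv track=rewrite | github.com/OrangeXenon54/Computational-Linguistics-Team-Lab-2019 | Ex5NER.py | WordPairs
-- ===== SOURCE A (Python) =====
-- def WordPairs(sentence) :
--     wordpairs = []
--     lastposition = len(sentence) - 1
--     noback = []
--     nofront = []
--     indnum = 0
--     for item in sentence :
--         if indnum == 0 :
--             noback.append(item)
--             indnum += 1
--         elif indnum < lastposition :
--             noback.append(item)
--             nofront.append(item)
--             indnum += 1
--         else :
--             nofront.append(item)
--     indnum = 0
--     while indnum < lastposition :
--         word1 = noback[indnum]
--         word2 = nofront[indnum]
--         pair = []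
--         pair.append(word1)
--         pair.append(word2)
--         wordpairs.append(pair)
--         indnum += 1
--     return wordpairs
-- ===== SOURCE B (Python) =====
-- def WordPairs(sentence):
--     it = iter(sentence)
--     try:
--         prev = next(it)
--     except StopIteration:
--         return []
--     wordpairs = []
--     for item in it:
--         wordpairs.append([prev, item])
--         prev = item
--     return wordpairs
-- ===== Notes on version B (the rewrite author's own statement) =====
-- stated objective: simpler
-- what changed: Replaced the two intermediate lists (noback/nofront) plus a second indexed while-loop with a single pass that tracks the previous element and emits each adjacent pair directly.
import Mathlib
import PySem

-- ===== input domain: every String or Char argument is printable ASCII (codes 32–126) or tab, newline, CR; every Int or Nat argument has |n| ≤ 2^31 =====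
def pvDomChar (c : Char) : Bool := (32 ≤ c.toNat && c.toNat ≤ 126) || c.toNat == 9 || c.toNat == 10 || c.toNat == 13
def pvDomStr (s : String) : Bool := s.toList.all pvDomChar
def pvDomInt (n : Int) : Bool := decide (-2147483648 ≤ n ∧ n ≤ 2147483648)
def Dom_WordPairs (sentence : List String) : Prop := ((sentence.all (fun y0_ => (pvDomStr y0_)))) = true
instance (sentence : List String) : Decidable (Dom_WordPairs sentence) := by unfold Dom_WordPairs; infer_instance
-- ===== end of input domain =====

-- B builds each adjacent pair in ONE pass that tracks the previous word, instead of A's two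
-- intermediate lists (noback/nofront) plus a second indexed while-loop. Objective: simpler.

-- ===== PORT A =====
-- the for-loop of A: state (noback, nofront, indnum)
def pvAFold (lastposition : Int) : List String → (List String × List String × Int) → (List String × List String × Int)
  | [], st => st
  | item :: rest, (noback, nofront, indnum) =>
    if indnum == 0 then
      pvAFold lastposition rest (noback ++ [item], nofront, indnum + 1)
    else if indnum < lastposition then
      pvAFold lastposition rest (noback ++ [item], nofront ++ [item], indnum + 1)
    else
      pvAFold lastposition rest (noback, nofront ++ [item], indnum)

-- the while-loop of A; noback[indnum]/nofront[indnum] are always in range when A runs this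
-- (so the .getD "" default is never taken and the port is exact)
def pvAWhile (noback nofront : List String) (lastposition indnum : Int) : List (List String) :=
  if h : indnum < lastposition then
    let word1 := (PySem.List.pyGet? noback indnum).getD ""
    let word2 := (PySem.List.pyGet? nofront indnum).getD ""
    [word1, word2] :: pvAWhile noback nofront lastposition (indnum + 1)
  else
    []
termination_by (lastposition - indnum).toNat
decreasing_by omega

def WordPairs (sentence : List String) : List (List String) :=
  let lastposition : Int := (sentence.length : Int) - 1
  let st := pvAFold lastposition sentence ([], [], 0)
  pvAWhile st.1 st.2.1 lastposition 0

-- ===== PORT B =====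
def pvAltGo (prev : String) : List String → List (List String)
  | [] => []
  | item :: rest => [prev, item] :: pvAltGo item rest

def WordPairs_alt (sentence : List String) : List (List String) :=
  match sentence with
  | [] => []
  | first :: rest => pvAltGo first rest

-- ===== PRECONDITION & SPEC =====
def Spec_WordPairs (sentence : List String) (out : List (List String)) : Prop := out = WordPairs_alt sentence
instance (sentence : List String) (out : List (List String)) : Decidable (Spec_WordPairs sentence out) := by unfold Spec_WordPairs; infer_instance

-- ===== CLAIM (what is proved, stated in full; the proofs are below) =====
def Claim_equal_WordPairs : Prop := ∀ (sentence : List String), Dom_WordPairs sentence → Spec_WordPairs sentence (WordPairs sentence)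

-- ===== LEMMAS AND PROOFS =====

def pvPairify (p : String × String) : List String := [p.1, p.2]

-- A's for-loop, after the first element: noback gets all but the last word, nofront gets the rest
theorem pvAFold_char (rest : List String) : ∀ (nb nf : List String) (i lp : Int),
    1 ≤ i → i + rest.length = lp + 1 →
    ∃ j, pvAFold lp rest (nb, nf, i) = (nb ++ rest.dropLast, nf ++ rest, j) := by
  induction rest with
  | nil => intro nb nf i lp _ _; exact ⟨i, by simp [pvAFold]⟩
  | cons x rest' ih =>
    intro nb nf i lp h1 h2
    have hne : (i == 0) = false := by simp; omega
    cases rest' with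
    | nil =>
      have hge : ¬ i < lp := by simp at h2; omega
      exact ⟨i, by simp [pvAFold, hne, hge]⟩
    | cons y rest'' =>
      have hlt : i < lp := by simp at h2; omega
      obtain ⟨j, hj⟩ := ih (nb ++ [x]) (nf ++ [x]) (i + 1) lp (by omega) (by simp at h2 ⊢; omega)
      refine ⟨j, ?_⟩
      rw [pvAFold]
      simp only [hne, Bool.false_eq_true, if_false, hlt, if_true, hj,
        List.dropLast_cons₂, List.append_assoc, List.singleton_append]

-- A's while-loop enumerates zipped pairs from index i up to nb.length
theorem pvAWhile_char (m : Nat) : ∀ (nb nf : List String) (i : Int),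
    0 ≤ i → (nb.length : Int) = i + m → nb.length = nf.length →
    pvAWhile nb nf (nb.length : Int) i =
      ((nb.drop i.toNat).zip (nf.drop i.toNat)).map pvPairify := by
  induction m with
  | zero =>
    intro nb nf i h0 hm _
    have hge : ¬ i < (nb.length : Int) := by omega
    have hd : nb.length ≤ i.toNat := by omega
    rw [pvAWhile]
    simp [hge, List.drop_eq_nil_of_le hd]
  | succ m ih =>
    intro nb nf i h0 hm hlen
    have hlt : i < (nb.length : Int) := by omega
    have hib : i.toNat < nb.length := by omega
    have hif : i.toNat < nf.length := by omega
    have h1 : PySem.List.pyGet? nb i = some nb[i.toNat] :=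
      PySem.List.pyGet?_eq_some_getElem nb h0 (by omega)
    have h2 : PySem.List.pyGet? nf i = some nf[i.toNat] :=
      PySem.List.pyGet?_eq_some_getElem nf h0 (by omega)
    rw [pvAWhile]
    simp only [hlt, dif_pos, h1, h2, Option.getD_some]
    rw [ih nb nf (i + 1) (by omega) (by omega) hlen]
    have ht : (i + 1).toNat = i.toNat + 1 := by omega
    have hdb : List.drop i.toNat nb = nb[i.toNat] :: List.drop (i.toNat + 1) nb :=
      (List.getElem_cons_drop hib).symm
    have hdf : List.drop i.toNat nf = nf[i.toNat] :: List.drop (i.toNat + 1) nf :=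
      (List.getElem_cons_drop hif).symm
    rw [ht, hdb, hdf]
    simp only [List.zip_cons_cons, List.map_cons, pvPairify]

theorem pvAltGo_char (l : List String) : ∀ prev,
    pvAltGo prev l = ((prev :: l).zip l).map pvPairify := by
  induction l with
  | nil => intro prev; rfl
  | cons y ys ih => intro prev; simp [pvAltGo, ih y, pvPairify]

theorem pvZip_dropLast (a : List String) : ∀ b : List String, b.length < a.length →
    a.dropLast.zip b = a.zip b := by
  induction a with
  | nil => intro b h; simp at h
  | cons x a' ih =>
    intro b h
    cases b with
    | nil => simp
    | cons y b' =>
      cases a' with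
      | nil => simp at h
      | cons z a'' =>
        have hb : b'.length < (z :: a'').length := by simpa using h
        simp only [List.dropLast_cons₂, List.zip_cons_cons, ih b' hb]

-- ===== VERDICT (by name: the statement is the Claim_ definition above) =====
theorem WordPairs_spec : Claim_equal_WordPairs := by
  intro s _
  unfold Spec_WordPairs
  cases s with
  | nil =>
    rw [WordPairs.eq_def, WordPairs_alt]
    simp only [pvAFold]
    rw [pvAWhile]
    simp
  | cons x rest =>
    cases rest with
    | nil =>
      rw [WordPairs.eq_def, WordPairs_alt]
      simp only [pvAFold]
      rw [pvAWhile]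
      simp [pvAltGo]
    | cons y rest' =>
      obtain ⟨j, hj⟩ := pvAFold_char (y :: rest') [x] [] 1
        (((x :: y :: rest').length : Int) - 1) (by omega) (by simp; omega)
      have hstep : pvAFold (((x :: y :: rest').length : Int) - 1) (x :: y :: rest') ([], [], 0)
          = pvAFold (((x :: y :: rest').length : Int) - 1) (y :: rest') ([x], [], 1) := by
        rw [pvAFold]; norm_num
      have hnb : ([x] ++ (y :: rest').dropLast).length = rest'.length + 1 := by simp
      have hlp : ((x :: y :: rest').length : Int) - 1
          = ((([x] ++ (y :: rest').dropLast)).length : Int) := by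
        rw [hnb]; simp
      simp only [WordPairs]
      rw [hstep, hj, hlp,
        pvAWhile_char ([x] ++ (y :: rest').dropLast).length _ _ 0 le_rfl
          (by simp) (by rw [hnb]; simp)]
      simp only [Int.toNat_zero, List.drop_zero, List.singleton_append, List.nil_append]
      rw [← List.dropLast_cons₂, pvZip_dropLast (x :: y :: rest') (y :: rest') (by simp),
        WordPairs_alt, pvAltGo_char]
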